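-- pv_equiv track=rewrite | github.com/Robert-Rendell/sudoku-project | sudoku.py | find_cells_that_share_axis
-- ===== SOURCE A (Python) =====
-- def find_cells_that_share_axis(cells):
--     xc = {}
--     yc = {}
--     shared_x = -1
--     shared_y = -1
--     shared_axis = {}
--     for x, y in cells:
--         for i, j in cells:
--             if x == i and j == y:
--                 continue
--             if x == i:
--                 axis = (x, "-")
--                 cell = (x, y)
--                 shared_axis.setdefault(axis, set([])).add(cell)
--
--             if y == j:
--                 axis = ("-", y)
--                 cell = (x, y)
--                 shared_axis.setdefault(axis, set([])).add(cell)
--     return shared_axis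
-- ===== SOURCE B (Python) =====
-- def find_cells_that_share_axis(cells):
--     # Group partner coordinates by row and by column in one pass, then emit
--     # each cell's shared axes from O(1) lookups.
--     ys_of_x = {}
--     xs_of_y = {}
--     for x, y in cells:
--         ys_of_x.setdefault(x, set()).add(y)
--         xs_of_y.setdefault(y, set()).add(x)
--     shared_axis = {}
--     for x, y in cells:
--         if len(ys_of_x[x]) > 1:
--             shared_axis.setdefault((x, "-"), set()).add((x, y))
--         if len(xs_of_y[y]) > 1:
--             shared_axis.setdefault(("-", y), set()).add((x, y))
--     return shared_axis
-- ===== Notes on version B (the rewrite author's own statement) =====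
-- stated objective: faster
-- what changed: Replaces A's quadratic all-pairs scan with one hash-grouping pass collecting the distinct partner coordinates per row and per column, then a single pass emitting each cell's shared axes; Pre_ excludes lists on which A's dict key-creation order is accidental (a cell opening both its axis keys whose nearest partner in the list is a column partner), where A happens to create the column-axis key first while B emits the row axis first - the grouped contents are identical either way.
import Mathlib
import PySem

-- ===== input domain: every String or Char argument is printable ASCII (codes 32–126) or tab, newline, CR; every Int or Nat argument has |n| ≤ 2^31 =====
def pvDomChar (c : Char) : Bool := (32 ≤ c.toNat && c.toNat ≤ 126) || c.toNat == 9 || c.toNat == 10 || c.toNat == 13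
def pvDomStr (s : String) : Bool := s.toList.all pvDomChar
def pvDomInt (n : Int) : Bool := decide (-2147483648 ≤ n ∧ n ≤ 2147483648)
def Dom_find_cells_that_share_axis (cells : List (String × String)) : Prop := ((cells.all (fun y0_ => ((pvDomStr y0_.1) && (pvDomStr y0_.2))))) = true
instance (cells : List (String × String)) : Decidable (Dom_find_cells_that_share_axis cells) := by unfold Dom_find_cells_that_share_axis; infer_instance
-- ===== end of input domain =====

-- B replaces A's quadratic all-pairs scan by one hash-grouping pass (distinct partner
-- coordinates per row and per column) and a single emitting pass.

-- ===== PORT A =====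
def find_cells_that_share_axis (cells : List (String × String)) : List (String × String × List (String × String)) :=
  -- nested 'for x, y in cells: for i, j in cells:' loop; 'shared_axis.setdefault(axis, set()).add(cell)'
  -- is Dict.modify with default ∅ and Set.add; the returned dict is marshalled to the output triple list
  (cells.foldl (fun d c =>
      cells.foldl (fun d ic =>
          if c.1 == ic.1 && ic.2 == c.2 then d
          else
            let d1 := if c.1 == ic.1 then d.modify (c.1, "-") [] (fun s => PySem.Set.add s (c.1, c.2)) else d
            if c.2 == ic.2 then d1.modify ("-", c.2) [] (fun s => PySem.Set.add s (c.1, c.2)) else d1)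
        d)
    PySem.Dict.empty).items.map (fun p => (p.1.1, p.1.2, p.2))

-- ===== PORT B =====
-- Source B's 'shared_axis.setdefault(axis, set()).add(cell)'
def pvEmit (d : PySem.Dict (String × String) (PySem.Set (String × String))) (axis cell : String × String) :
    PySem.Dict (String × String) (PySem.Set (String × String)) :=
  d.modify axis [] (fun s => PySem.Set.add s cell)

def find_cells_that_share_axis_alt (cells : List (String × String)) : List (String × String × List (String × String)) :=
  -- first loop: ys_of_x.setdefault(x, set()).add(y); xs_of_y.setdefault(y, set()).add(x)
  let groups := cells.foldl (fun st c =>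
      (st.1.modify c.1 [] (fun s => PySem.Set.add s c.2),
       st.2.modify c.2 [] (fun s => PySem.Set.add s c.1)))
    ((PySem.Dict.empty, PySem.Dict.empty))
  -- second loop: 'len(ys_of_x[x]) > 1' (the key is always present, so dict[x] = getD)
  (cells.foldl (fun d c =>
      let d1 := if 1 < PySem.Set.len (groups.1.getD c.1 []) then pvEmit d (c.1, "-") c else d
      if 1 < PySem.Set.len (groups.2.getD c.2 []) then pvEmit d1 ("-", c.2) c else d1)
    PySem.Dict.empty).items.map (fun p => (p.1.1, p.1.2, p.2))

-- ===== PRECONDITION & SPEC =====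
-- 'c.1 shares the row with c' / 'shares the column with c' (c itself never qualifies)
def pxp (x y : String) (c : String × String) : Bool := c.1 == x && !(c.2 == y)
def pyp (x y : String) (c : String × String) : Bool := c.2 == y && !(c.1 == x)

-- Pre_ excludes lists on which A's dict key-creation order is accidental: a cell that is the
-- first occurrence of both its row and its column, distinct from ("-","-"), whose both axes are
-- shared, and whose nearest axis partner in the list is a column partner — there A happens to
-- create the column-axis key before the row-axis key, while B always emits the row axis first;
-- both orders are equally defensible, the grouped contents are identical.
def preClause (cells pre : List (String × String)) (c : String × String) : Bool :=
  (c.1 == "-" && c.2 == "-")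
  || pre.any (fun p => p.1 == c.1)
  || pre.any (fun p => p.2 == c.2)
  || !(cells.any (pxp c.1 c.2))
  || !(cells.any (pyp c.1 c.2))
  || (match cells.find? (fun p => pxp c.1 c.2 p || pyp c.1 c.2 p) with
      | some c0 => pxp c.1 c.2 c0
      | none => true)

def preAux (cells : List (String × String)) : List (String × String) → List (String × String) → Bool
  | _, [] => true
  | pre, c :: rest => preClause cells pre c && preAux cells (pre ++ [c]) rest

def Pre_find_cells_that_share_axis (cells : List (String × String)) : Prop :=
  preAux cells [] cells = true
instance (cells : List (String × String)) : Decidable (Pre_find_cells_that_share_axis cells) := by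
  unfold Pre_find_cells_that_share_axis; infer_instance

def pvWitness_find_cells_that_share_axis : (List (String × String)) :=
  [("a", "b"), ("a", "c"), ("d", "b")]

def Spec_find_cells_that_share_axis (cells : List (String × String)) (out : List (String × String × List (String × String))) : Prop := out = find_cells_that_share_axis_alt cells
instance (cells : List (String × String)) (out : List (String × String × List (String × String))) : Decidable (Spec_find_cells_that_share_axis cells out) := by unfold Spec_find_cells_that_share_axis; infer_instance

-- ===== CLAIM (what is proved, stated in full; the proofs are below) =====
def Claim_equal_find_cells_that_share_axis : Prop := ∀ (cells : List (String × String)), Dom_find_cells_that_share_axis cells → Pre_find_cells_that_share_axis cells → Spec_find_cells_that_share_axis cells (find_cells_that_share_axis cells)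

-- ===== LEMMAS AND PROOFS =====

-- A's inner-loop body, rewritten with pxp/pyp (pointwise equal to the literal body)
def simpleStep (x y : String) (d : PySem.Dict (String × String) (PySem.Set (String × String))) (ic : String × String) :
    PySem.Dict (String × String) (PySem.Set (String × String)) :=
  if pxp x y ic then pvEmit d (x, "-") (x, y)
  else if pyp x y ic then pvEmit d ("-", y) (x, y) else d

-- what A's whole inner loop does for outer cell c
def stepA (cells : List (String × String)) (d : PySem.Dict (String × String) (PySem.Set (String × String)))
    (c : String × String) : PySem.Dict (String × String) (PySem.Set (String × String)) :=
  match cells.find? (fun p => pxp c.1 c.2 p || pyp c.1 c.2 p) with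
  | none => d
  | some c0 =>
    if pxp c.1 c.2 c0 then
      (if cells.any (pyp c.1 c.2) then pvEmit (pvEmit d (c.1, "-") c) ("-", c.2) c else pvEmit d (c.1, "-") c)
    else
      (if cells.any (pxp c.1 c.2) then pvEmit (pvEmit d ("-", c.2) c) (c.1, "-") c else pvEmit d ("-", c.2) c)

-- what B's second loop does for cell c (conditions already rewritten to pxp/pyp)
def stepB (cells : List (String × String)) (d : PySem.Dict (String × String) (PySem.Set (String × String)))
    (c : String × String) : PySem.Dict (String × String) (PySem.Set (String × String)) :=
  let d1 := if cells.any (pxp c.1 c.2) then pvEmit d (c.1, "-") c else d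
  if cells.any (pyp c.1 c.2) then pvEmit d1 ("-", c.2) c else d1

-- every axis key a processed cell would emit is already present
def pvInv (cells pre : List (String × String)) (d : PySem.Dict (String × String) (PySem.Set (String × String))) : Prop :=
  ∀ p ∈ pre, (cells.any (pxp p.1 p.2) = true → (p.1, "-") ∈ d.keys) ∧
             (cells.any (pyp p.1 p.2) = true → ("-", p.2) ∈ d.keys)

lemma nodup_emit (d : PySem.Dict (String × String) (PySem.Set (String × String))) (a c : String × String)
    (hd : d.keys.Nodup) : (pvEmit d a c).keys.Nodup := by
  unfold pvEmit PySem.Dict.modify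
  by_cases h : d.contains a = true
  · rw [PySem.Dict.keys_insert_of_contains _ _ h]; exact hd
  · rw [PySem.Dict.keys_insert_of_not_contains _ _ (by simpa using h)]
    simp [List.nodup_append, hd]
    intro u v huv heq
    exact h ((PySem.Dict.contains_iff_mem_keys d a).mpr (heq ▸ huv))

-- cell c is already recorded under axis a in d
def MemD (d : PySem.Dict (String × String) (PySem.Set (String × String))) (a c : String × String) : Prop :=
  ∃ s, d.get? a = some s ∧ c ∈ s

lemma mem_emit_self (d : PySem.Dict (String × String) (PySem.Set (String × String))) (a c : String × String) :
    MemD (pvEmit d a c) a c := by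
  refine ⟨(d.getD a []).add c, ?_, ?_⟩
  · unfold pvEmit PySem.Dict.modify
    exact PySem.Dict.get?_insert_self _ _ _
  · simp [PySem.Set.mem_add]

lemma mem_emit_mono (d : PySem.Dict (String × String) (PySem.Set (String × String))) (a c a' c' : String × String)
    (h : MemD d a c) : MemD (pvEmit d a' c') a c := by
  obtain ⟨s, hs, hc⟩ := h
  unfold pvEmit PySem.Dict.modify
  by_cases hk : a = a'
  · subst hk
    refine ⟨(d.getD a []).add c', PySem.Dict.get?_insert_self _ _ _, ?_⟩
    rw [PySem.Dict.getD_eq_get?_getD, hs]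
    rw [PySem.Set.mem_add]
    exact Or.inl hc
  · exact ⟨s, by rw [PySem.Dict.get?_insert_of_ne _ _ hk, hs], hc⟩

lemma emit_of_mem (d : PySem.Dict (String × String) (PySem.Set (String × String))) (a c : String × String)
    (hd : d.keys.Nodup) (h : MemD d a c) : pvEmit d a c = d := by
  obtain ⟨s, hs, hc⟩ := h
  have hadd : PySem.Set.add s c = s := by
    simp [PySem.Set.add, PySem.Set.contains, hc]
  have hgetD : d.getD a [] = s := by rw [PySem.Dict.getD_eq_get?_getD, hs]; rfl
  unfold pvEmit PySem.Dict.modify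
  show d.insert a (PySem.Set.add (d.getD a []) c) = d
  rw [hgetD, hadd]
  have hcont : d.contains a = true := by rw [PySem.Dict.contains_eq_isSome_get?, hs]; rfl
  apply PySem.Dict.ext
  rw [PySem.Dict.items_insert_of_contains _ _ hcont]
  have hmem : (a, s) ∈ d.items := (PySem.Dict.get?_eq_some_iff_mem_items d a s hd).mp hs
  have hd' : (d.items.map Prod.fst).Nodup := by
    simpa [PySem.Dict.keys] using hd
  conv_rhs => rw [← List.map_id d.items]
  apply List.map_congr_left
  intro p hp
  show (if (p.1 == a) = true then (a, s) else p) = p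
  by_cases hpa : p.1 = a
  · have hps : p = (a, s) := List.inj_on_of_nodup_map hd' hp hmem (by simpa using hpa)
    simp [hps]
  · simp [hpa]

lemma pxp_pyp_excl (x y : String) (c : String × String) (h : pxp x y c = true) : pyp x y c = false := by
  simp only [pxp, pyp, Bool.and_eq_true, Bool.not_eq_true'] at *
  simp [h.1]

lemma inner_char (x y : String) (l : List (String × String))
    (d : PySem.Dict (String × String) (PySem.Set (String × String))) (hd : d.keys.Nodup) :
    l.foldl (simpleStep x y) d =
      match l.find? (fun c => pxp x y c || pyp x y c) with
      | none => d
      | some c0 =>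
        if pxp x y c0 then
          (if l.any (pyp x y) then pvEmit (pvEmit d (x, "-") (x, y)) ("-", y) (x, y) else pvEmit d (x, "-") (x, y))
        else
          (if l.any (pxp x y) then pvEmit (pvEmit d ("-", y) (x, y)) (x, "-") (x, y) else pvEmit d ("-", y) (x, y)) := by
  induction l generalizing d with
  | nil => simp
  | cons c0 t ih =>
    simp only [List.foldl_cons, List.find?_cons, List.any_cons]
    by_cases hx : pxp x y c0 = true
    · have hy : pyp x y c0 = false := pxp_pyp_excl x y c0 hx
      rw [show simpleStep x y d c0 = pvEmit d (x, "-") (x, y) from by simp [simpleStep, hx]]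
      rw [ih _ (nodup_emit _ _ _ hd)]
      cases hf : t.find? (fun c => pxp x y c || pyp x y c) with
      | none =>
        have hpy : t.any (pyp x y) = false := by
          rw [List.any_eq_false]
          intro c1 hc1
          have := List.find?_eq_none.mp hf c1 hc1
          simp only [Bool.or_eq_true, not_or] at this
          simpa using this.2
        simp [hpy, hx, hy]
      | some c1 =>
        have hc1t : c1 ∈ t := List.mem_of_find?_eq_some hf
        have hc1P : (pxp x y c1 || pyp x y c1) = true := by simpa using List.find?_some hf
        by_cases hx1 : pxp x y c1 = true
        · have heq : pvEmit (pvEmit d (x, "-") (x, y)) (x, "-") (x, y) = pvEmit d (x, "-") (x, y) :=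
            emit_of_mem _ _ _ (nodup_emit _ _ _ hd) (mem_emit_self _ _ _)
          simp only [hy, Bool.false_or]
          simp [hx1, heq, hx]
        · have hy1 : pyp x y c1 = true := by
            cases hpx1 : pxp x y c1 with
            | true => exact absurd hpx1 hx1
            | false => simpa [hpx1] using hc1P
          have hpyany : t.any (pyp x y) = true := List.any_eq_true.mpr ⟨c1, hc1t, hy1⟩
          have h3 : pvEmit (pvEmit (pvEmit d (x, "-") (x, y)) ("-", y) (x, y)) (x, "-") (x, y)
              = pvEmit (pvEmit d (x, "-") (x, y)) ("-", y) (x, y) :=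
            emit_of_mem _ _ _ (nodup_emit _ _ _ (nodup_emit _ _ _ hd))
              (mem_emit_mono _ _ _ _ _ (mem_emit_self _ _ _))
          simp only [hy, Bool.false_or]
          simp [hx1, hpyany, hx, h3]
    · by_cases hy : pyp x y c0 = true
      · have hx' : pxp x y c0 = false := by simpa using hx
        rw [show simpleStep x y d c0 = pvEmit d ("-", y) (x, y) from by simp [simpleStep, hx', hy]]
        rw [ih _ (nodup_emit _ _ _ hd)]
        cases hf : t.find? (fun c => pxp x y c || pyp x y c) with
        | none =>
          have hpx : t.any (pxp x y) = false := by
            rw [List.any_eq_false]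
            intro c1 hc1
            have := List.find?_eq_none.mp hf c1 hc1
            simp only [Bool.or_eq_true, not_or] at this
            simpa using this.1
          simp [hpx, hx', hy]
        | some c1 =>
          have hc1t : c1 ∈ t := List.mem_of_find?_eq_some hf
          have hc1P : (pxp x y c1 || pyp x y c1) = true := by simpa using List.find?_some hf
          by_cases hx1 : pxp x y c1 = true
          · have hpxany : t.any (pxp x y) = true := List.any_eq_true.mpr ⟨c1, hc1t, hx1⟩
            have h3 : pvEmit (pvEmit (pvEmit d ("-", y) (x, y)) (x, "-") (x, y)) ("-", y) (x, y)
                = pvEmit (pvEmit d ("-", y) (x, y)) (x, "-") (x, y) :=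
              emit_of_mem _ _ _ (nodup_emit _ _ _ (nodup_emit _ _ _ hd))
                (mem_emit_mono _ _ _ _ _ (mem_emit_self _ _ _))
            simp only [hx', Bool.false_or]
            simp [hx1, hpxany, hy, h3, hx']
          · have hy1 : pyp x y c1 = true := by
              cases hpx1 : pxp x y c1 with
              | true => exact absurd hpx1 hx1
              | false => simpa [hpx1] using hc1P
            have heq : pvEmit (pvEmit d ("-", y) (x, y)) ("-", y) (x, y) = pvEmit d ("-", y) (x, y) :=
              emit_of_mem _ _ _ (nodup_emit _ _ _ hd) (mem_emit_self _ _ _)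
            simp only [hx', Bool.false_or]
            simp [hx1, heq, hy, hx']
      · rw [show simpleStep x y d c0 = d from by simp [simpleStep, hx, hy]]
        rw [ih d hd]
        simp only [Bool.not_eq_true] at hx hy
        cases hf : t.find? (fun c => pxp x y c || pyp x y c) <;> simp only [hx, hy, Bool.false_or]

-- A's inner loop for outer cell c IS stepA
lemma innerfold_eq_stepA (cells : List (String × String))
    (d : PySem.Dict (String × String) (PySem.Set (String × String))) (c : String × String)
    (hd : d.keys.Nodup) :
    cells.foldl (fun d ic =>
        if c.1 == ic.1 && ic.2 == c.2 then d
        else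
          let d1 := if c.1 == ic.1 then d.modify (c.1, "-") [] (fun s => PySem.Set.add s (c.1, c.2)) else d
          if c.2 == ic.2 then d1.modify ("-", c.2) [] (fun s => PySem.Set.add s (c.1, c.2)) else d1)
      d = stepA cells d c := by
  obtain ⟨x, y⟩ := c
  rw [PySem.List.foldl_congr_mem _ _ (simpleStep x y) d (by
    intro acc ic _
    obtain ⟨i, j⟩ := ic
    by_cases h1 : x = i
    · subst h1
      by_cases h2 : j = y
      · subst h2
        simp [simpleStep, pxp, pyp]
      · have hj : (j == y) = false := by simpa using h2
        have hj' : (y == j) = false := by simpa using (Ne.symm h2)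
        simp [simpleStep, pxp, pvEmit, hj, hj']
    · have hi : (x == i) = false := by simpa using h1
      have hi' : (i == x) = false := by simpa using (Ne.symm h1)
      by_cases h2 : j = y
      · subst h2
        simp [simpleStep, pxp, pyp, pvEmit, hi, hi']
      · have hj : (j == y) = false := by simpa using h2
        have hj' : (y == j) = false := by simpa using (Ne.symm h2)
        simp [simpleStep, pxp, pyp, hi, hi', hj, hj'])]
  rw [inner_char x y cells d hd]
  rfl

-- insertion into two keys commutes when one of them is already present
lemma insert_comm_left (d : PySem.Dict (String × String) (PySem.Set (String × String)))
    (a b : String × String) (va vb : PySem.Set (String × String))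
    (hab : a ≠ b) (ha : d.contains a = true) :
    (d.insert a va).insert b vb = (d.insert b vb).insert a va := by
  have hba : (b == a) = false := by simpa using (Ne.symm hab)
  have hab' : (a == b) = false := by simpa using hab
  apply PySem.Dict.ext
  by_cases hb : d.contains b = true
  · have hb1 : (d.insert a va).contains b = true := by rw [PySem.Dict.contains_insert]; simp [hb]
    have ha1 : (d.insert b vb).contains a = true := by rw [PySem.Dict.contains_insert]; simp [ha]
    rw [PySem.Dict.items_insert_of_contains _ _ hb1, PySem.Dict.items_insert_of_contains _ _ ha,
        PySem.Dict.items_insert_of_contains _ _ ha1, PySem.Dict.items_insert_of_contains _ _ hb]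
    rw [List.map_map, List.map_map]
    apply List.map_congr_left
    intro p _
    by_cases hpa : p.1 = a
    · simp [Function.comp, hpa, hab', hba]
    · by_cases hpb : p.1 = b
      · simp [Function.comp, hpb, hab', hba]
      · simp [Function.comp, show (p.1 == a) = false from by simpa using hpa,
              show (p.1 == b) = false from by simpa using hpb]
  · have hb1 : (d.insert a va).contains b = false := by
      rw [PySem.Dict.contains_insert]; simp [hba, hb]
    have ha1 : (d.insert b vb).contains a = true := by rw [PySem.Dict.contains_insert]; simp [ha]
    rw [PySem.Dict.items_insert_of_not_contains _ _ hb1, PySem.Dict.items_insert_of_contains _ _ ha,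
        PySem.Dict.items_insert_of_contains _ _ ha1,
        PySem.Dict.items_insert_of_not_contains _ _ (by simpa using hb)]
    rw [List.map_append]
    simp only [List.map_cons, List.map_nil]
    congr 2
    simp [hba]

lemma getD_emit_of_ne (d : PySem.Dict (String × String) (PySem.Set (String × String)))
    (a b c : String × String) (hab : b ≠ a) : (pvEmit d a c).getD b [] = d.getD b [] := by
  unfold pvEmit PySem.Dict.modify
  rw [PySem.Dict.getD_insert]
  simp [hab]

lemma emit_comm (d : PySem.Dict (String × String) (PySem.Set (String × String)))
    (a b c : String × String) (h : a ∈ d.keys ∨ b ∈ d.keys ∨ a = b) :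
    pvEmit (pvEmit d a c) b c = pvEmit (pvEmit d b c) a c := by
  by_cases hab : a = b
  · subst hab; rfl
  · have h1 : pvEmit (pvEmit d a c) b c
        = (d.insert a ((d.getD a []).add c)).insert b ((d.getD b []).add c) := by
      conv_lhs => rw [show pvEmit (pvEmit d a c) b c
        = (pvEmit d a c).insert b (((pvEmit d a c).getD b []).add c) from rfl]
      rw [getD_emit_of_ne d a b c (Ne.symm hab)]
      rfl
    have h2 : pvEmit (pvEmit d b c) a c
        = (d.insert b ((d.getD b []).add c)).insert a ((d.getD a []).add c) := by
      conv_lhs => rw [show pvEmit (pvEmit d b c) a c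
        = (pvEmit d b c).insert a (((pvEmit d b c).getD a []).add c) from rfl]
      rw [getD_emit_of_ne d b a c hab]
      rfl
    rw [h1, h2]
    rcases h with ha | hb | heq
    · exact insert_comm_left d a b _ _ hab ((PySem.Dict.contains_iff_mem_keys d a).mpr ha)
    · exact (insert_comm_left d b a _ _ (Ne.symm hab) ((PySem.Dict.contains_iff_mem_keys d b).mpr hb)).symm
    · exact absurd heq hab

lemma mem_keys_emit (d : PySem.Dict (String × String) (PySem.Set (String × String)))
    (a c k : String × String) (h : k ∈ d.keys) : k ∈ (pvEmit d a c).keys := by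
  unfold pvEmit PySem.Dict.modify
  exact (PySem.Dict.mem_keys_insert _ _ _ _).mpr (Or.inr h)

lemma mem_keys_emit_self (d : PySem.Dict (String × String) (PySem.Set (String × String)))
    (a c : String × String) : a ∈ (pvEmit d a c).keys := by
  unfold pvEmit PySem.Dict.modify
  exact (PySem.Dict.mem_keys_insert _ _ _ _).mpr (Or.inl rfl)

-- from the invariant: if an earlier cell sits on c's row, c's row-axis key is present
lemma key_of_prefix_row (cells pre : List (String × String))
    (d : PySem.Dict (String × String) (PySem.Set (String × String))) (c : String × String)
    (hinv : pvInv cells pre d) (hc : c ∈ cells) (hany : cells.any (pxp c.1 c.2) = true)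
    (p : String × String) (hp : p ∈ pre) (hpx : p.1 = c.1) : (c.1, "-") ∈ d.keys := by
  have hpany : cells.any (pxp p.1 p.2) = true := by
    by_cases hpy : p.2 = c.2
    · rw [List.any_eq_true] at hany ⊢
      obtain ⟨w, hw, hwp⟩ := hany
      exact ⟨w, hw, by simp_all [pxp]⟩
    · rw [List.any_eq_true]
      refine ⟨c, hc, ?_⟩
      simp [pxp, hpx]
      intro h
      exact hpy (by simp [h])
  have := (hinv p hp).1 hpany
  rwa [hpx] at this

lemma key_of_prefix_col (cells pre : List (String × String))
    (d : PySem.Dict (String × String) (PySem.Set (String × String))) (c : String × String)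
    (hinv : pvInv cells pre d) (hc : c ∈ cells) (hany : cells.any (pyp c.1 c.2) = true)
    (p : String × String) (hp : p ∈ pre) (hpy : p.2 = c.2) : ("-", c.2) ∈ d.keys := by
  have hpany : cells.any (pyp p.1 p.2) = true := by
    by_cases hpx : p.1 = c.1
    · rw [List.any_eq_true] at hany ⊢
      obtain ⟨w, hw, hwp⟩ := hany
      exact ⟨w, hw, by simp_all [pyp]⟩
    · rw [List.any_eq_true]
      refine ⟨c, hc, ?_⟩
      simp [pyp, hpy]
      intro h
      exact hpx (by simp [h])
  have := (hinv p hp).2 hpany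
  rwa [hpy] at this

-- the per-cell steps agree under the precondition clause and the invariant
lemma stepA_eq_stepB (cells pre : List (String × String))
    (d : PySem.Dict (String × String) (PySem.Set (String × String))) (c : String × String)
    (hinv : pvInv cells pre d) (hc : c ∈ cells) (hcl : preClause cells pre c = true) :
    stepA cells d c = stepB cells d c := by
  unfold stepA stepB
  cases hf : cells.find? (fun p => pxp c.1 c.2 p || pyp c.1 c.2 p) with
  | none =>
    have hall := List.find?_eq_none.mp hf
    have hx : cells.any (pxp c.1 c.2) = false := by
      rw [List.any_eq_false]; intro p hp
      have := hall p hp; simp only [Bool.or_eq_true, not_or] at this; simpa using this.1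
    have hy : cells.any (pyp c.1 c.2) = false := by
      rw [List.any_eq_false]; intro p hp
      have := hall p hp; simp only [Bool.or_eq_true, not_or] at this; simpa using this.2
    simp [hx, hy]
  | some c0 =>
    have hc0 : c0 ∈ cells := List.mem_of_find?_eq_some hf
    have hc0P : (pxp c.1 c.2 c0 || pyp c.1 c.2 c0) = true := by simpa using List.find?_some hf
    by_cases hx0 : pxp c.1 c.2 c0 = true
    · have hxany : cells.any (pxp c.1 c.2) = true := List.any_eq_true.mpr ⟨c0, hc0, hx0⟩
      cases hy : cells.any (pyp c.1 c.2) <;> simp [hx0, hxany, hy]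
    · have hy0 : pyp c.1 c.2 c0 = true := by
        cases h : pxp c.1 c.2 c0 with
        | true => exact absurd h hx0
        | false => simpa [h] using hc0P
      have hyany : cells.any (pyp c.1 c.2) = true := List.any_eq_true.mpr ⟨c0, hc0, hy0⟩
      simp only [hx0, if_neg, Bool.false_eq_true, not_false_iff, hyany, if_true]
      cases hxany : cells.any (pxp c.1 c.2) with
      | false => simp [hxany]
      | true =>
        simp only [hxany, if_true]
        -- both axes shared and the nearest partner is a column partner: the clause leaves
        -- only the possibilities making the two emits commute
        apply emit_comm d ("-", c.2) (c.1, "-") c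
        have hx0' : pxp c.1 c.2 c0 = false := by simpa using hx0
        unfold preClause at hcl
        rw [hf] at hcl
        simp only [hx0', hxany, hyany, Bool.not_true, Bool.or_false] at hcl
        rw [Bool.or_eq_true, Bool.or_eq_true] at hcl
        rcases hcl with (h1 | h2) | h3
        · right; right
          simp only [Bool.and_eq_true, beq_iff_eq] at h1
          simp [h1.1, h1.2]
        · right; left
          obtain ⟨p, hp, hpx⟩ := List.any_eq_true.mp h2
          exact key_of_prefix_row cells pre d c hinv hc hxany p hp (by simpa using hpx)
        · left
          obtain ⟨p, hp, hpy⟩ := List.any_eq_true.mp h3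
          exact key_of_prefix_col cells pre d c hinv hc hyany p hp (by simpa using hpy)

lemma nodup_stepB (cells : List (String × String))
    (d : PySem.Dict (String × String) (PySem.Set (String × String))) (c : String × String)
    (hd : d.keys.Nodup) : (stepB cells d c).keys.Nodup := by
  unfold stepB
  by_cases hx : cells.any (pxp c.1 c.2) = true <;>
    by_cases hy : cells.any (pyp c.1 c.2) = true <;>
      simp only [hx, hy, if_true, if_false, Bool.not_eq_true] <;>
        first
        | exact nodup_emit _ _ _ (nodup_emit _ _ _ hd)
        | exact nodup_emit _ _ _ hd
        | exact hd
        | (simp only [show cells.any (pxp c.1 c.2) = false from by simpa using hx, if_neg] <;> skip)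

lemma keys_stepB_mono (cells : List (String × String))
    (d : PySem.Dict (String × String) (PySem.Set (String × String))) (c k : String × String)
    (h : k ∈ d.keys) : k ∈ (stepB cells d c).keys := by
  unfold stepB
  by_cases hx : cells.any (pxp c.1 c.2) = true <;>
    by_cases hy : cells.any (pyp c.1 c.2) = true <;>
      simp only [hx, hy, if_true, if_false] <;>
        first
        | exact mem_keys_emit _ _ _ _ (mem_keys_emit _ _ _ _ h)
        | exact mem_keys_emit _ _ _ _ h
        | exact h

lemma inv_stepB (cells pre : List (String × String))
    (d : PySem.Dict (String × String) (PySem.Set (String × String))) (c : String × String)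
    (hinv : pvInv cells pre d) : pvInv cells (pre ++ [c]) (stepB cells d c) := by
  intro p hp
  rw [List.mem_append, List.mem_singleton] at hp
  rcases hp with hp | hp
  · exact ⟨fun h => keys_stepB_mono cells d c _ ((hinv p hp).1 h),
           fun h => keys_stepB_mono cells d c _ ((hinv p hp).2 h)⟩
  · subst hp
    constructor
    · intro hx
      unfold stepB
      simp only [hx, if_true]
      by_cases hy : cells.any (pyp p.1 p.2) = true
      · simp only [hy, if_true]
        exact mem_keys_emit _ _ _ _ (mem_keys_emit_self _ _ _)
      · simp only [show cells.any (pyp p.1 p.2) = false from by simpa using hy,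
          Bool.false_eq_true, if_false]
        exact mem_keys_emit_self _ _ _
    · intro hy
      unfold stepB
      simp only [hy, if_true]
      exact mem_keys_emit_self _ _ _

-- the main loop invariant argument: A's fold and stepB's fold coincide on Pre_
lemma main_fold (cells : List (String × String)) :
    ∀ (suffix pre : List (String × String)) (d : PySem.Dict (String × String) (PySem.Set (String × String))),
    preAux cells pre suffix = true → d.keys.Nodup → pvInv cells pre d → (∀ c ∈ suffix, c ∈ cells) →
    suffix.foldl (fun d c =>
        cells.foldl (fun d ic =>
            if c.1 == ic.1 && ic.2 == c.2 then d
            else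
              let d1 := if c.1 == ic.1 then d.modify (c.1, "-") [] (fun s => PySem.Set.add s (c.1, c.2)) else d
              if c.2 == ic.2 then d1.modify ("-", c.2) [] (fun s => PySem.Set.add s (c.1, c.2)) else d1)
          d)
      d = suffix.foldl (stepB cells) d := by
  intro suffix
  induction suffix with
  | nil => intro pre d _ _ _ _; rfl
  | cons c rest ih =>
    intro pre d hpre hd hinv hsub
    simp only [List.foldl_cons]
    rw [innerfold_eq_stepA cells d c hd]
    have hcl : preClause cells pre c = true ∧ preAux cells (pre ++ [c]) rest = true := by
      simpa [preAux, Bool.and_eq_true] using hpre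
    rw [stepA_eq_stepB cells pre d c hinv (hsub c (List.mem_cons_self)) hcl.1]
    exact ih (pre ++ [c]) (stepB cells d c) hcl.2 (nodup_stepB cells d c hd)
      (inv_stepB cells pre d c hinv) (fun p hp => hsub p (List.mem_cons_of_mem c hp))

-- characterisation of B's grouping dicts
lemma getD_group (key val : (String × String) → String) (l : List (String × String))
    (d : PySem.Dict String (PySem.Set String)) (x : String) :
    (l.foldl (fun d c => d.modify (key c) [] (fun s => PySem.Set.add s (val c))) d).getD x []
      = PySem.Set.update (d.getD x []) ((l.filter (fun c => key c == x)).map val) := by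
  induction l generalizing d with
  | nil => simp [PySem.Set.update]
  | cons c t ih =>
    simp only [List.foldl_cons, List.filter_cons]
    rw [ih]
    by_cases h : key c = x
    · simp only [show (key c == x) = true from by simpa using h, if_true, List.map_cons,
        PySem.Set.update_cons]
      rw [PySem.Dict.getD_modify]
      simp [h]
    · simp only [show (key c == x) = false from by simpa using h, if_false]
      rw [PySem.Dict.getD_modify]
      simp [Ne.symm h]

lemma one_lt_of_two_mem {s : List String} {y z : String} (hy : y ∈ s) (hz : z ∈ s) (hne : y ≠ z) :
    1 < s.length := by
  match s with
  | [] => simp at hy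
  | [a] =>
    simp at hy hz
    exact absurd (hy.trans hz.symm) hne
  | a :: b :: t => simp

lemma exists_ne_of_one_lt {s : List String} (h : 1 < s.length) (hnd : s.Nodup) (y : String) :
    ∃ z ∈ s, z ≠ y := by
  match s with
  | [] => simp at h
  | [a] => simp at h
  | a :: b :: t =>
    have hab : a ≠ b := by simp [List.nodup_cons] at hnd; exact fun h' => hnd.1.1 (h' ▸ rfl)
    by_cases hay : a = y
    · exact ⟨b, by simp, fun hby => hab (by rw [hay, hby])⟩
    · exact ⟨a, by simp, hay⟩

-- '1 < len(distinct partner coords)' is exactly 'some other cell shares the axis'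
lemma shared_row_iff (cells : List (String × String)) (x y : String) (hmem : (x, y) ∈ cells) :
    (1 < PySem.Set.len (PySem.Set.ofList ((cells.filter (fun c => c.1 == x)).map (fun c => c.2))))
      ↔ cells.any (pxp x y) = true := by
  set ys := (cells.filter (fun c => c.1 == x)).map (fun c => c.2) with hys
  have hyys : y ∈ ys := by
    rw [hys, List.mem_map]
    exact ⟨(x, y), by simp [List.mem_filter, hmem], rfl⟩
  have hlen : PySem.Set.len (PySem.Set.ofList ys) = ((PySem.Set.ofList ys).length : Int) := by
    simp [PySem.Set.len]
  rw [hlen]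
  constructor
  · intro h
    have h' : 1 < (PySem.Set.ofList ys).length := by exact_mod_cast h
    obtain ⟨z, hz, hzy⟩ := exists_ne_of_one_lt h' (PySem.Set.nodup_ofList ys) y
    rw [PySem.Set.mem_ofList] at hz
    rw [hys, List.mem_map] at hz
    obtain ⟨c, hc, hcz⟩ := hz
    rw [List.mem_filter] at hc
    rw [List.any_eq_true]
    refine ⟨c, hc.1, ?_⟩
    simp [pxp, show c.1 = x from by simpa using hc.2]
    intro h2
    exact hzy (by rw [← hcz, h2])
  · intro h
    rw [List.any_eq_true] at h
    obtain ⟨c, hc, hcp⟩ := h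
    simp only [pxp, Bool.and_eq_true, Bool.not_eq_true', beq_iff_eq, beq_eq_false_iff_ne] at hcp
    have hcz : c.2 ∈ ys := by
      rw [hys, List.mem_map]
      exact ⟨c, by simp [List.mem_filter, hc, hcp.1], rfl⟩
    have : 1 < (PySem.Set.ofList ys).length :=
      one_lt_of_two_mem ((PySem.Set.mem_ofList _ _).mpr hyys) ((PySem.Set.mem_ofList _ _).mpr hcz)
        (fun hyz => hcp.2 (by rw [← hyz]))
    exact_mod_cast this

lemma shared_col_iff (cells : List (String × String)) (x y : String) (hmem : (x, y) ∈ cells) :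
    (1 < PySem.Set.len (PySem.Set.ofList ((cells.filter (fun c => c.2 == y)).map (fun c => c.1))))
      ↔ cells.any (pyp x y) = true := by
  set xs := (cells.filter (fun c => c.2 == y)).map (fun c => c.1) with hxs
  have hxxs : x ∈ xs := by
    rw [hxs, List.mem_map]
    exact ⟨(x, y), by simp [List.mem_filter, hmem], rfl⟩
  have hlen : PySem.Set.len (PySem.Set.ofList xs) = ((PySem.Set.ofList xs).length : Int) := by
    simp [PySem.Set.len]
  rw [hlen]
  constructor
  · intro h
    have h' : 1 < (PySem.Set.ofList xs).length := by exact_mod_cast h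
    obtain ⟨z, hz, hzx⟩ := exists_ne_of_one_lt h' (PySem.Set.nodup_ofList xs) x
    rw [PySem.Set.mem_ofList] at hz
    rw [hxs, List.mem_map] at hz
    obtain ⟨c, hc, hcz⟩ := hz
    rw [List.mem_filter] at hc
    rw [List.any_eq_true]
    refine ⟨c, hc.1, ?_⟩
    simp [pyp, show c.2 = y from by simpa using hc.2]
    intro h2
    exact hzx (by rw [← hcz, h2])
  · intro h
    rw [List.any_eq_true] at h
    obtain ⟨c, hc, hcp⟩ := h
    simp only [pyp, Bool.and_eq_true, Bool.not_eq_true', beq_iff_eq, beq_eq_false_iff_ne] at hcp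
    have hcz : c.1 ∈ xs := by
      rw [hxs, List.mem_map]
      exact ⟨c, by simp [List.mem_filter, hc, hcp.1], rfl⟩
    have : 1 < (PySem.Set.ofList xs).length :=
      one_lt_of_two_mem ((PySem.Set.mem_ofList _ _).mpr hxxs) ((PySem.Set.mem_ofList _ _).mpr hcz)
        (fun hxz => hcp.2 (by rw [← hxz]))
    exact_mod_cast this

-- B's port fold IS the stepB fold
lemma altfold_eq (cells : List (String × String)) :
    find_cells_that_share_axis_alt cells
      = (cells.foldl (stepB cells) PySem.Dict.empty).items.map (fun p => (p.1.1, p.1.2, p.2)) := by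
  unfold find_cells_that_share_axis_alt
  rw [show (List.foldl (fun (st : PySem.Dict String (PySem.Set String) × PySem.Dict String (PySem.Set String)) (c : String × String) =>
        (st.1.modify c.1 [] fun s => PySem.Set.add s c.2, st.2.modify c.2 [] fun s => PySem.Set.add s c.1))
        ((PySem.Dict.empty, PySem.Dict.empty)) cells)
      = (cells.foldl (fun d (c : String × String) => d.modify c.1 [] fun s => PySem.Set.add s c.2) PySem.Dict.empty,
         cells.foldl (fun d (c : String × String) => d.modify c.2 [] fun s => PySem.Set.add s c.1) PySem.Dict.empty)
    from PySem.List.foldl_prod_mk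
      (f := fun d (c : String × String) => d.modify c.1 [] fun s => PySem.Set.add s c.2)
      (g := fun d (c : String × String) => d.modify c.2 [] fun s => PySem.Set.add s c.1)
      cells PySem.Dict.empty PySem.Dict.empty]
  show List.map (fun p => (p.1.1, p.1.2, p.2)) (List.foldl (fun d (c : String × String) =>
      let d1 := if 1 < PySem.Set.len ((cells.foldl (fun d (c : String × String) => d.modify c.1 [] fun s => PySem.Set.add s c.2) PySem.Dict.empty).getD c.1 []) then pvEmit d (c.1, "-") c else d
      if 1 < PySem.Set.len ((cells.foldl (fun d (c : String × String) => d.modify c.2 [] fun s => PySem.Set.add s c.1) PySem.Dict.empty).getD c.2 []) then pvEmit d1 ("-", c.2) c else d1)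
    PySem.Dict.empty cells).items = _
  congr 1
  congr 1
  apply PySem.List.foldl_congr_mem
  intro acc c hc
  have hc' : (c.1, c.2) ∈ cells := by simpa using hc
  have hrow := getD_group (fun c => c.1) (fun c => c.2) cells PySem.Dict.empty c.1
  have hcol := getD_group (fun c => c.2) (fun c => c.1) cells PySem.Dict.empty c.2
  rw [PySem.Dict.getD_empty] at hrow hcol
  rw [PySem.Set.update_nil_left] at hrow hcol
  simp only [hrow, hcol, stepB]
  by_cases hx : cells.any (pxp c.1 c.2) = true
  · rw [if_pos ((shared_row_iff cells c.1 c.2 hc').mpr hx)]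
    simp only [hx, if_true]
    by_cases hy : cells.any (pyp c.1 c.2) = true
    · rw [if_pos ((shared_col_iff cells c.1 c.2 hc').mpr hy)]
      simp [hy]
    · rw [if_neg (fun h => hy ((shared_col_iff cells c.1 c.2 hc').mp h))]
      simp only [show cells.any (pyp c.1 c.2) = false from by simpa using hy]
      simp
  · rw [if_neg (fun h => hx ((shared_row_iff cells c.1 c.2 hc').mp h))]
    simp only [show cells.any (pxp c.1 c.2) = false from by simpa using hx, if_false]
    by_cases hy : cells.any (pyp c.1 c.2) = true
    · rw [if_pos ((shared_col_iff cells c.1 c.2 hc').mpr hy)]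
      simp [hy]
    · rw [if_neg (fun h => hy ((shared_col_iff cells c.1 c.2 hc').mp h))]
      simp only [show cells.any (pyp c.1 c.2) = false from by simpa using hy]
      simp

-- ===== VERDICT (by name: the statement is the Claim_ definition above) =====
theorem find_cells_that_share_axis_spec : Claim_equal_find_cells_that_share_axis := by
  intro cells _ hpre
  unfold Spec_find_cells_that_share_axis
  rw [altfold_eq]
  unfold find_cells_that_share_axis
  congr 1
  congr 1
  exact main_fold cells cells [] PySem.Dict.empty hpre PySem.Dict.nodup_keys_empty
    (by intro p hp; simp at hp) (fun c hc => hc)
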